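-- pv_equiv track=rewrite | github.com/chrisburke716/historyBookLLM | src/history_book/services/ingestion_service.py | _concatenate_paragraphs
-- ===== SOURCE A (Python) =====
-- from typing import List, Tuple, Optional
--
-- def _concatenate_paragraphs(
--     blocks: List[str], block_pages: List[int]
-- ) -> Tuple[List[str], List[int]]:
--     """
--     Concatenate paragraphs that are split across multiple blocks/pages.
--
--     This is a simplified version - the original has more complex logic.
--     """
--     if not blocks:
--         return [], []
--
--     concatenated = []
--     concatenated_pages = []
--
--     current_paragraph = blocks[0]
--     current_page = block_pages[0]
--
--     for i in range(1, len(blocks)):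
--         block = blocks[i]
--         page = block_pages[i]
--
--         # Simple heuristic: if block starts with lowercase, it's likely a continuation
--         if block and block[0].islower() and page == current_page + 1:
--             current_paragraph += " " + block
--         else:
--             # Save current paragraph and start new one
--             concatenated.append(current_paragraph)
--             concatenated_pages.append(current_page)
--             current_paragraph = block
--             current_page = page
--
--     # Don't forget the last paragraph
--     if current_paragraph:
--         concatenated.append(current_paragraph)
--         concatenated_pages.append(current_page)
--
--     return concatenated, concatenated_pages
-- ===== SOURCE B (Python) =====
-- from typing import List, Tuple
--
--
-- def _concatenate_paragraphs(
--     blocks: List[str], block_pages: List[int]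
-- ) -> Tuple[List[str], List[int]]:
--     """Group blocks into paragraphs, then join each group once at the end."""
--     if not blocks:
--         return [], []
--
--     # Phase 1: group the blocks. Each group is ([blocks...], start_page); a block
--     # joins the current group iff it starts lowercase and sits on the next page
--     # after the group's start page.
--     groups = []
--     for block, page in zip(blocks, block_pages):
--         if groups and block and block[0].islower() and page == groups[-1][1] + 1:
--             groups[-1][0].append(block)
--         else:
--             groups.append(([block], page))
--
--     # Phase 2: join each group into one paragraph.
--     paragraphs = [" ".join(g) for g, _ in groups]
--     pages = [p for _, p in groups]
--
--     # The original drops only a falsy FINAL paragraph.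
--     if not paragraphs[-1]:
--         paragraphs.pop()
--         pages.pop()
--     return paragraphs, pages
-- ===== Notes on version B (the rewrite author's own statement) =====
-- stated objective: alternative
-- what changed: Replaces A's single accumulating loop (growing current_paragraph by string concatenation) with a two-phase decomposition: one pass groups the zipped (block, page) pairs into paragraph groups, then each group is joined once and the final-only empty-paragraph guard is applied to the built lists.
import Mathlib
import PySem

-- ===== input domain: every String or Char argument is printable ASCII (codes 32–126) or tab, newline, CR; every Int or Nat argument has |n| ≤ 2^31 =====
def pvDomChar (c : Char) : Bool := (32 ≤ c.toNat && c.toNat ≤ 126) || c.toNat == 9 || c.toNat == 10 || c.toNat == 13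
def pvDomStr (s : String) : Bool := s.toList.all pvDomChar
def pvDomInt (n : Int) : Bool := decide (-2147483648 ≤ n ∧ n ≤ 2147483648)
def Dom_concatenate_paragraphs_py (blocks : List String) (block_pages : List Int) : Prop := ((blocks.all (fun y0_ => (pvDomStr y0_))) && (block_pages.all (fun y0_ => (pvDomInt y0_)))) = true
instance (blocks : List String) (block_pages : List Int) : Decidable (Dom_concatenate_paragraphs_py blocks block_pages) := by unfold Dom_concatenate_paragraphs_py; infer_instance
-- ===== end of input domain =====

-- B regroups the zipped (block, page) pairs first and joins each group once (alternative
-- decomposition, not claimed faster); Pre_ excludes only the inputs where A raises IndexError.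

-- continuation predicate shared by both Pythons: `block and block[0].islower() and page == current_page + 1`
def pvIsCont (block : String) (page curPage : Int) : Bool :=
  (decide (block ≠ "")) &&
    (match PySem.Str.pyGet? block 0 with
     | some c => PySem.Chars.islower c
     | none => false) &&
    (page == curPage + 1)

-- ===== PORT A =====
def concatenate_paragraphs_py (blocks : List String) (block_pages : List Int) : List String × List Int :=
  if blocks = [] then ([], [])
  else
    -- state: (concatenated, concatenated_pages, current_paragraph, current_page)
    let init : List String × List Int × String × Int :=
      ([], [], PySem.List.pyGetD blocks 0 "", PySem.List.pyGetD block_pages 0 0)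
    let st := (PySem.List.pyRange 1 (blocks.length : Int) 1).foldl
      (fun (s : List String × List Int × String × Int) i =>
        let block := PySem.List.pyGetD blocks i ""      -- index in range under Pre_
        let page := PySem.List.pyGetD block_pages i 0   -- index in range under Pre_
        if pvIsCont block page s.2.2.2 then
          (s.1, s.2.1, s.2.2.1 ++ " " ++ block, s.2.2.2)
        else
          (s.1 ++ [s.2.2.1], s.2.1 ++ [s.2.2.2], block, page)) init
    if st.2.2.1 ≠ "" then (st.1 ++ [st.2.2.1], st.2.1 ++ [st.2.2.2])
    else (st.1, st.2.1)

-- ===== PORT B =====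
-- phase 1: groups are kept in reverse order, head = the currently open group (append-to-last)
def pvGroupsRev (pairs : List (String × Int)) : List (List String × Int) :=
  pairs.foldl (fun gs bp =>
    match gs with
    | (g, p0) :: rest =>
        if pvIsCont bp.1 bp.2 p0 then (g ++ [bp.1], p0) :: rest
        else ([bp.1], bp.2) :: (g, p0) :: rest
    | [] => [([bp.1], bp.2)]) []

def concatenate_paragraphs_py_alt (blocks : List String) (block_pages : List Int) : List String × List Int :=
  if blocks = [] then ([], [])
  else
    let groups := (pvGroupsRev (blocks.zip block_pages)).reverse
    let paragraphs := groups.map (fun g => PySem.Str.join " " g.1)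
    let pages := groups.map (·.2)
    if paragraphs.getLast? = some "" then (paragraphs.dropLast, pages.dropLast)
    else (paragraphs, pages)

-- ===== PRECONDITION & SPEC =====
-- Pre_ excludes exactly the inputs on which A raises IndexError: a nonempty blocks list
-- with fewer pages than blocks (A never returns there, so nothing is carved out of A's range).
def Pre_concatenate_paragraphs_py (blocks : List String) (block_pages : List Int) : Prop :=
  blocks = [] ∨ blocks.length ≤ block_pages.length
instance (blocks : List String) (block_pages : List Int) : Decidable (Pre_concatenate_paragraphs_py blocks block_pages) := by unfold Pre_concatenate_paragraphs_py; infer_instance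

def pvWitness_concatenate_paragraphs_py : List String × List Int :=
  (["Alpha.", "beta line", "Gamma"], [1, 2, 2])

def Spec_concatenate_paragraphs_py (blocks : List String) (block_pages : List Int) (out : List String × List Int) : Prop := out = concatenate_paragraphs_py_alt blocks block_pages
instance (blocks : List String) (block_pages : List Int) (out : List String × List Int) : Decidable (Spec_concatenate_paragraphs_py blocks block_pages out) := by unfold Spec_concatenate_paragraphs_py; infer_instance

-- ===== CLAIM (what is proved, stated in full; the proofs are below) =====
def Claim_equal_concatenate_paragraphs_py : Prop := ∀ (blocks : List String) (block_pages : List Int), Dom_concatenate_paragraphs_py blocks block_pages → Pre_concatenate_paragraphs_py blocks block_pages → Spec_concatenate_paragraphs_py blocks block_pages (concatenate_paragraphs_py blocks block_pages)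

-- ===== LEMMAS AND PROOFS =====

-- joining a group extended by one block = the old join ++ " " ++ block
lemma pv_chars_join_append (s b : List Char) : ∀ (l : List (List Char)), l ≠ [] →
    PySem.Chars.join s (l ++ [b]) = PySem.Chars.join s l ++ s ++ b := by
  intro l hl
  induction l with
  | nil => exact absurd rfl hl
  | cons p rest ih =>
    cases rest with
    | nil => simp [PySem.Chars.join_cons_cons, PySem.Chars.join_singleton]
    | cons q r =>
      have h1 : (p :: q :: r) ++ [b] = p :: ((q :: r) ++ [b]) := by simp
      have h2 : (q :: r) ++ [b] = q :: (r ++ [b]) := by simp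
      rw [h1, h2, PySem.Chars.join_cons_cons, ← h2, ih (by simp),
        PySem.Chars.join_cons_cons]
      simp

lemma pv_str_join_append (b : String) (l : List String) (hl : l ≠ []) :
    PySem.Str.join " " (l ++ [b]) = PySem.Str.join " " l ++ " " ++ b := by
  apply String.toList_inj.mp
  have hl' : l.map String.toList ≠ [] := by simpa using hl
  have := pv_chars_join_append " ".toList b.toList (l.map String.toList) hl'
  simp only [PySem.Str.toList_join, List.map_append, List.map_cons, List.map_nil] at *
  rw [String.toList_append, String.toList_append, PySem.Str.toList_join]
  simpa using this

lemma pv_str_join_singleton (b : String) : PySem.Str.join " " [b] = b := by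
  apply String.toList_inj.mp
  simp [PySem.Str.toList_join, PySem.Chars.join_singleton]

-- A's loop body / B's loop body, and the state correspondence
def pv_fA (s : List String × List Int × String × Int) (bp : String × Int) :
    List String × List Int × String × Int :=
  if pvIsCont bp.1 bp.2 s.2.2.2 then (s.1, s.2.1, s.2.2.1 ++ " " ++ bp.1, s.2.2.2)
  else (s.1 ++ [s.2.2.1], s.2.1 ++ [s.2.2.2], bp.1, bp.2)

def pv_fB (gs : List (List String × Int)) (bp : String × Int) : List (List String × Int) :=
  match gs with
  | (g, p0) :: rest =>
      if pvIsCont bp.1 bp.2 p0 then (g ++ [bp.1], p0) :: rest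
      else ([bp.1], bp.2) :: (g, p0) :: rest
  | [] => [([bp.1], bp.2)]

def pv_toA : List (List String × Int) → List String × List Int × String × Int
  | [] => ([], [], "", 0)
  | (g, q) :: rest =>
      ((rest.map (fun g => PySem.Str.join " " g.1)).reverse,
       (rest.map (·.2)).reverse, PySem.Str.join " " g, q)

-- A's fold over indices 1..len-1 is the fold of pv_fA over the dropped zip
lemma pv_foldl_pyRange_zip {σ : Type} (f : σ → String → Int → σ) :
    ∀ (n : Nat) (a : Nat) (blocks : List String) (pages : List Int),
    blocks.length ≤ pages.length → n = blocks.length - a → ∀ (init : σ),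
    (PySem.List.pyRange a (blocks.length : Int) 1).foldl
      (fun s i => f s (PySem.List.pyGetD blocks i "") (PySem.List.pyGetD pages i 0)) init
    = ((blocks.zip pages).drop a).foldl (fun s bp => f s bp.1 bp.2) init := by
  intro n
  induction n with
  | zero =>
    intro a blocks pages hlen hn init
    have ha : blocks.length ≤ a := by omega
    rw [PySem.List.pyRange_one_eq_nil (by exact_mod_cast ha)]
    rw [List.drop_of_length_le (by simp; omega)]
    rfl
  | succ m ih =>
    intro a blocks pages hlen hn init
    have ha : a < blocks.length := by omega
    have hap : a < pages.length := by omega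
    rw [PySem.List.pyRange_one_cons (by exact_mod_cast ha)]
    rw [List.drop_eq_getElem_cons (by simp; omega)]
    simp only [List.foldl_cons, List.getElem_zip]
    have e1 : PySem.List.pyGetD blocks (a : Int) "" = blocks[a] := by
      rw [PySem.List.pyGetD_natCast]; exact List.getD_eq_getElem _ _ ha
    have e2 : PySem.List.pyGetD pages (a : Int) 0 = pages[a] := by
      rw [PySem.List.pyGetD_natCast]; exact List.getD_eq_getElem _ _ hap
    rw [e1, e2]
    have hcast : ((a : Int) + 1) = ((a + 1 : Nat) : Int) := by push_cast; ring
    rw [hcast, ih (a + 1) blocks pages hlen (by omega)]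

-- the loop invariant: A's state is pv_toA of B's reversed group stack
lemma pv_inv (ps : List (String × Int)) :
    ∀ (g0 : List String) (p0 : Int) (rest : List (List String × Int)), g0 ≠ [] →
    ps.foldl pv_fA (pv_toA ((g0, p0) :: rest)) = pv_toA (ps.foldl pv_fB ((g0, p0) :: rest)) := by
  induction ps with
  | nil => intro g0 p0 rest _; rfl
  | cons bp ps ih =>
    intro g0 p0 rest hg
    simp only [List.foldl_cons]
    by_cases hc : pvIsCont bp.1 bp.2 p0
    · have hA : pv_fA (pv_toA ((g0, p0) :: rest)) bp = pv_toA ((g0 ++ [bp.1], p0) :: rest) := by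
        simp [pv_fA, pv_toA, hc, pv_str_join_append bp.1 g0 hg]
      have hB : pv_fB ((g0, p0) :: rest) bp = (g0 ++ [bp.1], p0) :: rest := by
        simp [pv_fB, hc]
      rw [hA, hB, ih _ _ _ (by simp)]
    · have hA : pv_fA (pv_toA ((g0, p0) :: rest)) bp = pv_toA (([bp.1], bp.2) :: (g0, p0) :: rest) := by
        simp [pv_fA, pv_toA, hc, pv_str_join_singleton]
      have hB : pv_fB ((g0, p0) :: rest) bp = ([bp.1], bp.2) :: (g0, p0) :: rest := by
        simp [pv_fB, hc]
      rw [hA, hB, ih _ _ _ (by simp)]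

lemma pv_fB_ne_nil (ps : List (String × Int)) :
    ∀ gs, gs ≠ [] → ps.foldl pv_fB gs ≠ [] := by
  induction ps with
  | nil => intro gs h; simpa using h
  | cons bp ps ih =>
    intro gs h
    apply ih
    cases gs with
    | nil => simp [pv_fB]
    | cons g rest => obtain ⟨g1, g2⟩ := g; simp [pv_fB]; split <;> simp

theorem pv_main : ∀ (blocks : List String) (block_pages : List Int),
    Pre_concatenate_paragraphs_py blocks block_pages →
    concatenate_paragraphs_py blocks block_pages = concatenate_paragraphs_py_alt blocks block_pages := by
  intro blocks pages hpre
  cases blocks with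
  | nil => simp [concatenate_paragraphs_py, concatenate_paragraphs_py_alt]
  | cons b0 bs =>
    have hlen : (b0 :: bs).length ≤ pages.length := by
      rcases hpre with h | h
      · exact absurd h (by simp)
      · exact h
    cases pages with
    | nil => simp at hlen
    | cons q0 qs =>
      -- A's side: rewrite the indexed loop as a fold of pv_fA over bs.zip qs
      have hA : concatenate_paragraphs_py (b0 :: bs) (q0 :: qs) =
          (let st := (bs.zip qs).foldl pv_fA ([], [], b0, q0)
           if st.2.2.1 ≠ "" then (st.1 ++ [st.2.2.1], st.2.1 ++ [st.2.2.2])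
           else (st.1, st.2.1)) := by
        have hz := pv_foldl_pyRange_zip (fun s b pg => pv_fA s (b, pg))
          bs.length 1 (b0 :: bs) (q0 :: qs) hlen (by simp) ([], [], b0, q0)
        simp only [concatenate_paragraphs_py, List.cons_ne_nil, if_false,
          PySem.List.pyGetD_zero_cons]
        rw [show ((b0 :: bs).zip (q0 :: qs)).drop 1 = bs.zip qs by simp] at hz
        rw [show (((PySem.List.pyRange 1 ((b0 :: bs).length : Int) 1).foldl
          (fun (s : List String × List Int × String × Int) i =>
            let block := PySem.List.pyGetD (b0 :: bs) i ""
            let page := PySem.List.pyGetD (q0 :: qs) i 0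
            if pvIsCont block page s.2.2.2 then
              (s.1, s.2.1, s.2.2.1 ++ " " ++ block, s.2.2.2)
            else
              (s.1 ++ [s.2.2.1], s.2.1 ++ [s.2.2.2], block, page)) ([], [], b0, q0))) =
          (bs.zip qs).foldl pv_fA ([], [], b0, q0) from hz]
      -- B's side: its fold is pv_fB, and the first pair seeds the stack
      have hB : pvGroupsRev ((b0 :: bs).zip (q0 :: qs)) =
          (bs.zip qs).foldl pv_fB [([b0], q0)] := rfl
      rw [hA]
      -- connect through the invariant
      have hseed : pv_toA [([b0], q0)] = (([], [], b0, q0) : List String × List Int × String × Int) := by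
        simp [pv_toA, pv_str_join_singleton]
      have hinv := pv_inv (bs.zip qs) [b0] q0 [] (by simp)
      rw [hseed] at hinv
      obtain ⟨gsF, hgsF⟩ : ∃ gsF, (bs.zip qs).foldl pv_fB [([b0], q0)] = gsF := ⟨_, rfl⟩
      have hne : gsF ≠ [] := hgsF ▸ pv_fB_ne_nil (bs.zip qs) [([b0], q0)] (by simp)
      obtain ⟨⟨gF, qF⟩, restF, rfl⟩ : ∃ g restF, gsF = g :: restF := by
        cases gsF with
        | nil => exact absurd rfl hne
        | cons g r => exact ⟨g, r, rfl⟩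
      rw [hgsF] at hinv
      rw [hinv]
      -- now both sides are about ((gF, qF) :: restF)
      simp only [concatenate_paragraphs_py_alt, List.cons_ne_nil, if_false, hB, hgsF]
      simp only [pv_toA, List.reverse_cons, List.map_append, List.map_cons, List.map_nil,
        List.map_reverse]
      rw [List.getLast?_concat, List.dropLast_concat, List.dropLast_concat]
      by_cases hemp : PySem.Str.join " " gF = ""
      · simp [hemp]
      · simp [hemp]
      -- done
-- ===== VERDICT (by name: the statement is the Claim_ definition above) =====
theorem concatenate_paragraphs_py_spec : Claim_equal_concatenate_paragraphs_py := by
  intro blocks block_pages _ hpre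
  exact pv_main blocks block_pages hpre
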